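-- pv_equiv track=rewrite | github.com/Lightblues/Leetcode | contest/291.py | appealSum0
-- ===== SOURCE A (Python) =====
-- import collections
--
-- def appealSum0(s: str) -> int:
--     """ 滑动窗口. 显然会超时 """
--     n = len(s)
--     ans = n
--     for i in range(2, n+1):
--         c = collections.Counter(s[:i])
--         ans += len(c)
--         for j in range(i, n):
--             c[s[j]] += 1
--             c[s[j-i]] -= 1
--             if c[s[j-i]]==0: del c[s[j-i]]
--             ans += len(c)
--     return ans
-- ===== SOURCE B (Python) =====
-- def appealSum0(s: str) -> int:
--     """O(n): each position j contributes (j - last[s[j]]) * (n - j), where last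
--     is the previous occurrence index of the character (-1 if none)."""
--     n = len(s)
--     ans = 0
--     last = {}
--     for j, ch in enumerate(s):
--         ans += (j - last.get(ch, -1)) * (n - j)
--         last[ch] = j
--     return ans
-- ===== Notes on version B (the rewrite author's own statement) =====
-- stated objective: faster
-- what changed: Replaced the per-length sliding-window Counter scan (summing len(Counter) over every window of every length) with a single pass that adds, for each position j, the closed-form contribution (j - last_occurrence[s[j]]) * (n - j) of s[j] as a first occurrence.
import Mathlib
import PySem

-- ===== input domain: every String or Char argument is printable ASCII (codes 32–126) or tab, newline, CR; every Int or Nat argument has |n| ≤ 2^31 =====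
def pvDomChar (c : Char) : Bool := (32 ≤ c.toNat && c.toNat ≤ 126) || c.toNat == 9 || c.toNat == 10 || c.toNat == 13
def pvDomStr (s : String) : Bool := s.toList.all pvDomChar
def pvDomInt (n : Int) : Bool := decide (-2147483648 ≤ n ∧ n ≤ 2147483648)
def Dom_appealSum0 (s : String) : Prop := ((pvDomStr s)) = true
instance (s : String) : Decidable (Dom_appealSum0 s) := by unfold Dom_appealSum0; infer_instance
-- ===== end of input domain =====

-- B replaces A's per-length sliding-window Counter scan by a single pass adding, per position,
-- the closed-form contribution (j - last occurrence of s[j]) * (n - j); objective: faster (O(n) vs O(n^2)).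

-- ===== PORT A =====
-- the body of A's inner 'for j in range(i, n)' loop (state: the sliding Counter c and ans)
def pvABody (l : List Char) (i : Int) (st : PySem.Dict Char Int × Int) (j : Int) :
    PySem.Dict Char Int × Int :=
  let c := st.1.modify (PySem.List.pyGetD l j ' ') 0 (· + 1)
  let c := c.modify (PySem.List.pyGetD l (j - i) ' ') 0 (· - 1)
  let c := if c.getD (PySem.List.pyGetD l (j - i) ' ') 0 == 0
           then c.erase (PySem.List.pyGetD l (j - i) ' ') else c
  (c, st.2 + (c.size : Int))

def appealSum0 (s : String) : Int :=
  let l := s.toList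
  let n : Int := (l.length : Int)
  let ans : Int := n
  (PySem.List.pyRange 2 (n + 1)).foldl (fun ans i =>
    let c := PySem.Dict.counter (PySem.List.slice l none (some i))
    let ans := ans + (c.size : Int)
    ((PySem.List.pyRange i n).foldl (pvABody l i) (c, ans)).2) ans

-- ===== PORT B =====
-- the body of B's single 'for j, ch in enumerate(s)' loop (state: ans and the last-occurrence dict)
def pvBBody (n : Int) (st : Int × PySem.Dict Char Int) (p : Int × Char) :
    Int × PySem.Dict Char Int :=
  (st.1 + (p.1 - st.2.getD p.2 (-1)) * (n - p.1), st.2.insert p.2 p.1)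

def appealSum0_alt (s : String) : Int :=
  let l := s.toList
  let n : Int := (l.length : Int)
  ((PySem.List.enumerate l).foldl (pvBBody n) (0, PySem.Dict.empty)).1

-- ===== PRECONDITION & SPEC =====
def Spec_appealSum0 (s : String) (out : Int) : Prop := out = appealSum0_alt s
instance (s : String) (out : Int) : Decidable (Spec_appealSum0 s out) := by unfold Spec_appealSum0; infer_instance

-- ===== CLAIM (what is proved, stated in full; the proofs are below) =====
def Claim_equal_appealSum0 : Prop := ∀ (s : String), Dom_appealSum0 s → Spec_appealSum0 s (appealSum0 s)

-- ===== LEMMAS AND PROOFS =====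

-- 'position j is a first occurrence of its character within the substring starting at a'
def pvNew (l : List Char) (a j : Nat) : Bool := decide (l.getD j ' ' ∉ (l.take j).drop a)

-- number of starts a ≤ j for which position j is a first occurrence
def pvCnt (l : List Char) (j : Nat) : Nat :=
  ((Finset.range (j + 1)).filter (fun a => pvNew l a j = true)).card

def pvE (l : List Char) (a j : Nat) : Int := if pvNew l a j then 1 else 0

-- number of distinct characters
def pvDis (w : List Char) : Nat := w.toFinset.card

-- the common value of both programs: sum over positions of contribution * number of right ends
def pvT (l : List Char) : Int :=
  ∑ j ∈ Finset.range l.length, (pvCnt l j : Int) * ((l.length : Int) - (j : Nat))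

-- per-length window sum (A's outer loop computes these)
def pvW (l : List Char) (i : Nat) : Int :=
  ∑ u ∈ Finset.range (l.length - i + 1), (pvDis ((l.drop u).take i) : Int)

-- the Counter invariant of A's sliding window
def pvInv (w : List Char) (c : PySem.Dict Char Int) : Prop :=
  c.keys.Nodup ∧ (∀ k, c.getD k 0 = (w.count k : Int)) ∧ (∀ k, k ∈ c.keys ↔ k ∈ w)

-- v is the index of the last occurrence of ch in p (-1 if none)
def pvLast (p : List Char) (ch : Char) (v : Int) : Prop :=
  (v = -1 ∧ ch ∉ p) ∨
  (0 ≤ v ∧ v < p.length ∧ p.getD v.toNat ' ' = ch ∧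
    ∀ m : Nat, v < m → m < p.length → p.getD m ' ' ≠ ch)

lemma pv_mem_drop_iff (p : List Char) (a : Nat) (ch : Char) :
    ch ∈ p.drop a ↔ ∃ m : Nat, a ≤ m ∧ m < p.length ∧ p.getD m ' ' = ch := by
  constructor
  · intro h
    rcases List.mem_iff_getElem.1 h with ⟨i, hi, hget⟩
    refine ⟨a + i, Nat.le_add_right _ _, ?_, ?_⟩
    · have := List.length_drop (l := p) (i := a); omega
    · rw [List.getD_eq_getElem?_getD, List.getElem?_eq_getElem (by have := List.length_drop (l := p) (i := a); omega)]
      simpa [List.getElem_drop] using hget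
  · rintro ⟨m, ham, hm, hget⟩
    have : p.drop a ≠ [] := by
      intro h; rw [List.drop_eq_nil_iff] at h; omega
    refine List.mem_iff_getElem.2 ⟨m - a, by simp [List.length_drop]; omega, ?_⟩
    rw [List.getElem_drop]
    rw [List.getD_eq_getElem?_getD, List.getElem?_eq_getElem hm] at hget
    simpa [Nat.add_sub_cancel' ham] using hget

lemma pv_win_cons (l : List Char) (t i : Nat) (ht : t < l.length) (hi : 1 ≤ i) :
    (l.drop t).take i = l.getD t ' ' :: (l.drop (t + 1)).take (i - 1) := by
  have h1 : l.drop t = l[t] :: l.drop (t + 1) := List.drop_eq_getElem_cons ht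
  obtain ⟨i', rfl⟩ : ∃ i', i = i' + 1 := ⟨i - 1, by omega⟩
  rw [h1, List.take_succ_cons]
  simp [List.getD_eq_getElem?_getD, List.getElem?_eq_getElem ht]

lemma pv_win_snoc (l : List Char) (t i : Nat) (h : t + i < l.length) :
    (l.drop t).take (i + 1) = (l.drop t).take i ++ [l.getD (t + i) ' '] := by
  have hi : i < (l.drop t).length := by simp [List.length_drop]; omega
  rw [List.take_add_one, List.getElem?_eq_getElem hi]
  simp [List.getElem_drop, List.getD_eq_getElem?_getD, List.getElem?_eq_getElem h]

lemma pv_dis_window (l : List Char) (a i : Nat) (h : a + i ≤ l.length) :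
    (pvDis ((l.drop a).take i) : Int) = ∑ j ∈ Finset.Ico a (a + i), pvE l a j := by
  induction i with
  | zero => simp [pvDis]
  | succ i ih =>
    have hlt : a + i < l.length := by omega
    have hsnoc : (l.drop a).take (i + 1) = (l.drop a).take i ++ [l.getD (a + i) ' '] := by
      have hi : i < (l.drop a).length := by simp [List.length_drop]; omega
      rw [List.take_add_one, List.getElem?_eq_getElem hi]
      simp [List.getElem_drop, List.getD_eq_getElem?_getD, List.getElem?_eq_getElem hlt]
    have hwin : (l.drop a).take i = (l.take (a + i)).drop a := by
      rw [List.drop_take]; congr 1; omega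
    have hsum : ∑ j ∈ Finset.Ico a (a + (i+1)), pvE l a j
        = (∑ j ∈ Finset.Ico a (a + i), pvE l a j) + pvE l a (a + i) := by
      have : a + (i + 1) = (a + i) + 1 := by omega
      rw [this, Finset.sum_Ico_succ_top (by omega)]
    rw [hsum, ← ih (by omega), hsnoc]
    have hnew : pvE l a (a + i) = if l.getD (a+i) ' ' ∈ (l.drop a).take i then 0 else 1 := by
      simp only [pvE, pvNew, hwin]
      by_cases hmem : l.getD (a+i) ' ' ∈ (l.take (a+i)).drop a <;> simp [hmem]
    rw [hnew]
    have hins : ((l.drop a).take i ++ [l.getD (a+i) ' ']).toFinset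
        = insert (l.getD (a+i) ' ') ((l.drop a).take i).toFinset := by
      simp [List.toFinset_append, Finset.union_comm]
    simp only [pvDis, hins]
    by_cases hmem : l.getD (a+i) ' ' ∈ (l.drop a).take i
    · rw [Finset.insert_eq_self.2 (List.mem_toFinset.2 hmem)]
      rw [if_pos hmem]; ring
    · rw [Finset.card_insert_of_notMem (by simpa using hmem)]
      simp only [if_neg hmem]
      push_cast; ring

lemma pv_size_of_inv (w : List Char) (c : PySem.Dict Char Int) (h : pvInv w c) :
    c.size = pvDis w := by
  obtain ⟨hnd, _, hmem⟩ := h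
  have h1 : c.size = c.keys.length := by
    simp [PySem.Dict.size, PySem.Dict.keys]
  have h2 : c.keys.toFinset = w.toFinset := by
    ext k; simp [List.mem_toFinset, hmem k]
  rw [h1, ← List.toFinset_card_of_nodup hnd, h2, pvDis]

lemma pv_inv_counter (xs : List Char) : pvInv xs (PySem.Dict.counter xs) := by
  refine ⟨PySem.Dict.nodup_keys_counter xs, ?_, ?_⟩
  · intro k; simpa using PySem.Dict.getD_counter xs k
  · intro k
    rw [PySem.Dict.keys_counter]
    exact PySem.Set.mem_ofList xs k

lemma pv_get?_erase_self (d : PySem.Dict Char Int) (k : Char) : (d.erase k).get? k = none := by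
  simp only [PySem.Dict.get?, PySem.Dict.erase]
  rw [List.find?_eq_none.2]
  · rfl
  · intro x hx hpx
    have := (List.mem_filter.1 hx).2
    simp_all

lemma pv_find_filter_ne (items : List (Char × Int)) (k k' : Char) (h : k' ≠ k) :
    (items.filter (fun p => !(p.1 == k))).find? (fun p => p.1 == k')
      = items.find? (fun p => p.1 == k') := by
  induction items with
  | nil => rfl
  | cons p rest ih =>
    by_cases hk : p.1 = k
    · have h1 : (p.1 == k) = true := by simp [hk]
      have h2 : (p.1 == k') = false := by simp [hk]; exact fun hh => h hh.symm
      simp [List.filter_cons, h1, List.find?_cons, h2, ih]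
    · have h1 : (p.1 == k) = false := by simp [hk]
      by_cases hk' : p.1 = k'
      · have hne : ¬ (k' = k) := h
        simp [List.filter_cons, h1, List.find?_cons, hk', hne]
      · have h2 : (p.1 == k') = false := by simp [hk']
        simp [List.filter_cons, h1, List.find?_cons, h2, ih]

lemma pv_get?_erase_ne (d : PySem.Dict Char Int) (k k' : Char) (h : k' ≠ k) :
    (d.erase k).get? k' = d.get? k' := by
  simp only [PySem.Dict.get?, PySem.Dict.erase]
  rw [pv_find_filter_ne _ _ _ h]

lemma pv_keys_erase (d : PySem.Dict Char Int) (k : Char) :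
    (d.erase k).keys = d.keys.filter (fun x => !(x == k)) := by
  simp only [PySem.Dict.keys, PySem.Dict.erase, List.filter_map]
  rfl

lemma pv_getD_erase_self (d : PySem.Dict Char Int) (k : Char) : (d.erase k).getD k 0 = 0 := by
  simp [PySem.Dict.getD, pv_get?_erase_self]

lemma pv_getD_erase_ne (d : PySem.Dict Char Int) (k k' : Char) (h : k' ≠ k) :
    (d.erase k).getD k' 0 = d.getD k' 0 := by
  simp [PySem.Dict.getD, pv_get?_erase_ne d k k' h]

lemma pv_count_helper (m : List Char) (x y k : Char) : ((m ++ [y]).count k : Int)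
      = (((x :: m).count k : Int) + (if k = y then 1 else 0)) - (if k = x then 1 else 0) := by
  have e1 : (m ++ [y]).count k = m.count k + (if k = y then 1 else 0) := by
    rw [List.count_append, List.count_singleton']
    congr 1
    exact if_congr ⟨Eq.symm, Eq.symm⟩ rfl rfl
  have e2 : (x :: m).count k = m.count k + (if k = x then 1 else 0) := by
    rw [List.count_cons]
    congr 1
    by_cases hk : k = x
    · simp [hk]
    · simp [hk]
      exact fun h => hk (Eq.symm h)
  rw [e1, e2]
  push_cast [apply_ite]
  split_ifs <;> omega

lemma pv_inv_step (x y : Char) (m : List Char) (c : PySem.Dict Char Int)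
    (h : pvInv (x :: m) c) :
    pvInv (m ++ [y])
      (if ((c.modify y 0 (· + 1)).modify x 0 (· - 1)).getD x 0 == 0
       then ((c.modify y 0 (· + 1)).modify x 0 (· - 1)).erase x
       else (c.modify y 0 (· + 1)).modify x 0 (· - 1)) := by
  obtain ⟨hnd, hget, hmem⟩ := h
  set c1 : PySem.Dict Char Int := c.modify y 0 (· + 1) with hc1
  set c2 : PySem.Dict Char Int := c1.modify x 0 (· - 1) with hc2
  have hnd1 : c1.keys.Nodup := by
    rw [show c1.keys = (c.insert y (c.getD y 0 + 1)).keys from PySem.Dict.keys_modify c y 0 _]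
    exact PySem.Dict.nodup_keys_insert _ _ _ hnd
  have hnd2 : c2.keys.Nodup := by
    rw [show c2.keys = (c1.insert x (c1.getD x 0 - 1)).keys from PySem.Dict.keys_modify c1 x 0 _]
    exact PySem.Dict.nodup_keys_insert _ _ _ hnd1
  have hget1 : ∀ k, c1.getD k 0 = ((x :: m).count k : Int) + (if k = y then 1 else 0) := by
    intro k
    rw [hc1, PySem.Dict.getD_modify]
    by_cases hk : k = y <;> simp [hk, hget y, hget k]
  have hget2 : ∀ k, c2.getD k 0
      = ((x :: m).count k : Int) + (if k = y then 1 else 0) - (if k = x then 1 else 0) := by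
    intro k
    rw [hc2, PySem.Dict.getD_modify]
    by_cases hk : k = x <;> simp [hk, hget1 x, hget1 k] <;> ring
  have hmem1 : ∀ k, k ∈ c1.keys ↔ (k = y ∨ k ∈ x :: m) := by
    intro k
    rw [show c1.keys = (c.insert y (c.getD y 0 + 1)).keys from PySem.Dict.keys_modify c y 0 _,
      PySem.Dict.mem_keys_insert]
    exact or_congr Iff.rfl (hmem k)
  have hmem2 : ∀ k, k ∈ c2.keys ↔ (k = x ∨ k = y ∨ k ∈ x :: m) := by
    intro k
    rw [show c2.keys = (c1.insert x (c1.getD x 0 - 1)).keys from PySem.Dict.keys_modify c1 x 0 _,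
      PySem.Dict.mem_keys_insert]
    exact or_congr Iff.rfl (hmem1 k)
  have hcount : ∀ k : Char, ((m ++ [y]).count k : Int)
      = ((x :: m).count k : Int) + (if k = y then 1 else 0) - (if k = x then 1 else 0) := by
    intro k
    exact pv_count_helper m x y k
  have hgx : c2.getD x 0 = ((m.count x : Int) + (if x = y then 1 else 0)) := by
    rw [hget2 x]
    simp [List.count_cons]
    push_cast; ring
  by_cases hz : c2.getD x 0 = 0
  · -- erase branch: x no longer occurs in the new window
    have hxz : m.count x = 0 ∧ x ≠ y := by
      rw [hgx] at hz
      by_cases hxy : x = y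
      · exfalso; simp [hxy] at hz; omega
      · refine ⟨?_, hxy⟩; simp [hxy] at hz; omega
    have hxnm : x ∉ m := List.count_eq_zero.1 hxz.1
    rw [if_pos (by simp [hz])]
    refine ⟨?_, ?_, ?_⟩
    · rw [pv_keys_erase]
      exact hnd2.filter _
    · intro k
      by_cases hk : k = x
      · subst hk
        rw [pv_getD_erase_self, hcount, ← hget2 k, hz]
      · rw [pv_getD_erase_ne _ _ _ hk, hget2 k, hcount]
    · intro k
      rw [pv_keys_erase, List.mem_filter]
      constructor
      · rintro ⟨hk2, hkne⟩
        have hkx : k ≠ x := by simpa using hkne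
        rcases (hmem2 k).1 hk2 with h | h | h
        · exact absurd h hkx
        · simp [h]
        · rcases List.mem_cons.1 h with h' | h'
          · exact absurd h' hkx
          · simp [h']
      · intro hk
        rcases List.mem_append.1 hk with h' | h'
        · have hkx : k ≠ x := fun he => hxnm (he ▸ h')
          exact ⟨(hmem2 k).2 (Or.inr (Or.inr (List.mem_cons.2 (Or.inr h')))), by simpa using hkx⟩
        · have hky : k = y := by simpa using h'
          have hkx : k ≠ x := fun he => hxz.2 (he.symm.trans hky)
          exact ⟨(hmem2 k).2 (Or.inr (Or.inl hky)), by simpa using hkx⟩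
  · -- keep branch: x still occurs in the new window
    have hxin : x ∈ m ∨ x = y := by
      rw [hgx] at hz
      by_cases hxy : x = y
      · exact Or.inr hxy
      · simp [hxy] at hz
        exact Or.inl (List.count_pos_iff.1 (by omega))
    rw [if_neg (by simpa using hz)]
    refine ⟨hnd2, ?_, ?_⟩
    · intro k; rw [hget2 k, hcount]
    · intro k
      rw [hmem2 k]
      constructor
      · rintro (h | h | h)
        · rcases hxin with h' | h'
          · exact List.mem_append.2 (Or.inl (h ▸ h'))
          · exact List.mem_append.2 (Or.inr (by simp [h, h']))
        · exact List.mem_append.2 (Or.inr (by simp [h]))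
        · rcases List.mem_cons.1 h with h' | h'
          · rcases hxin with h'' | h''
            · exact List.mem_append.2 (Or.inl (h' ▸ h''))
            · exact List.mem_append.2 (Or.inr (by simp [h', h'']))
          · exact List.mem_append.2 (Or.inl h')
      · intro hk
        rcases List.mem_append.1 hk with h' | h'
        · exact Or.inr (Or.inr (List.mem_cons.2 (Or.inr h')))
        · exact Or.inr (Or.inl (by simpa using h'))

lemma pv_pyRange_nil (a b : Int) (h : b ≤ a) : PySem.List.pyRange a b = [] := by
  simp [PySem.List.pyRange]
  intro h2; omega

lemma pv_inner_loop (l : List Char) (i : Nat) (hi : 1 ≤ i) :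
    ∀ (k t : Nat) (c : PySem.Dict Char Int) (ans : Int),
      l.length - (t + i) = k → t + i ≤ l.length →
      pvInv ((l.drop t).take i) c →
      ((PySem.List.pyRange ((t + i : Nat) : Int) ((l.length : Nat) : Int)).foldl
          (pvABody l (i : Nat)) (c, ans)).2
        = ans + ∑ u ∈ Finset.Ico (t + 1) (l.length - i + 1),
            (pvDis ((l.drop u).take i) : Int) := by
  intro k
  induction k with
  | zero =>
    intro t c ans hk hle _
    have ht : t + i = l.length := by omega
    rw [pv_pyRange_nil _ _ (by exact_mod_cast Nat.cast_le.2 (le_of_eq ht.symm))]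
    rw [show l.length - i + 1 = t + 1 by omega]
    simp
  | succ k ih =>
    intro t c ans hk hle hinv
    have hlt : t + i < l.length := by omega
    -- peel the first iteration j = t + i
    rw [PySem.List.pyRange_one_cons (by exact_mod_cast hlt)]
    rw [List.foldl_cons]
    -- identify the characters
    have hx : PySem.List.pyGetD l (((t + i : Nat) : Int) - (i : Nat)) ' ' = l.getD t ' ' := by
      rw [show ((t + i : Nat) : Int) - ((i : Nat) : Int) = ((t : Nat) : Int) by push_cast; ring]
      exact PySem.List.pyGetD_natCast l t ' '
    have hy : PySem.List.pyGetD l ((t + i : Nat) : Int) ' ' = l.getD (t + i) ' ' := by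
      exact PySem.List.pyGetD_natCast l (t + i) ' '
    have hcons : (l.drop t).take i = l.getD t ' ' :: (l.drop (t + 1)).take (i - 1) :=
      pv_win_cons l t i (by omega) hi
    have hsnoc : (l.drop (t + 1)).take (i - 1) ++ [l.getD (t + i) ' '] = (l.drop (t + 1)).take i := by
      have := pv_win_snoc l (t + 1) (i - 1) (by omega)
      rw [show i - 1 + 1 = i by omega] at this
      rw [show t + 1 + (i - 1) = t + i by omega] at this
      exact this.symm
    have hinv' : pvInv ((l.drop (t + 1)).take i)
        (pvABody l (i : Nat) (c, ans) ((t + i : Nat) : Int)).1 := by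
      simp only [pvABody, hx, hy]
      rw [← hsnoc]
      exact pv_inv_step _ _ _ _ (hcons ▸ hinv)
    have hbody2 : (pvABody l (i : Nat) (c, ans) ((t + i : Nat) : Int)).2
        = ans + (pvDis ((l.drop (t + 1)).take i) : Int) := by
      have := pv_size_of_inv _ _ hinv'
      simp only [pvABody] at this ⊢
      rw [this]
    have hpair : pvABody l (i : Nat) (c, ans) ((t + i : Nat) : Int)
        = ((pvABody l (i : Nat) (c, ans) ((t + i : Nat) : Int)).1,
           ans + (pvDis ((l.drop (t + 1)).take i) : Int)) := by
      rw [← hbody2]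
    rw [show ((t + i : Nat) : Int) + 1 = (((t + 1) + i : Nat) : Int) by push_cast; ring]
    rw [hpair]
    rw [ih (t + 1) _ _ (by omega) (by omega) hinv']
    rw [Finset.sum_eq_sum_Ico_succ_bot (a := t + 1) (b := l.length - i + 1) (by omega)
      (fun u => (pvDis ((l.drop u).take i) : Int))]
    ring

lemma pv_pyRange_natCast (a b : Nat) : PySem.List.pyRange (a:Int) (b:Int)
    = (List.range (b - a)).map (fun k => ((a + k : Nat) : Int)) := by
  simp only [PySem.List.pyRange]
  rw [if_neg (by omega)]
  by_cases hab : (a:Int) < (b:Int)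
  · rw [if_pos (by omega), if_pos hab]
    have : ((b:Int) - a + 1 - 1) / 1 = ((b - a : Nat) : Int) := by push_cast; omega
    rw [this, Int.toNat_natCast]
    apply List.map_congr_left
    intro k _; push_cast; ring
  · rw [if_pos (by omega), if_neg hab]
    have : b - a = 0 := by omega
    simp [this]

lemma pv_dis_one (l : List Char) (u : Nat) (hu : u < l.length) :
    pvDis ((l.drop u).take 1) = 1 := by
  have : (l.drop u).take 1 = [l.getD u ' '] := by
    have h1 : l.drop u = l[u] :: l.drop (u + 1) := List.drop_eq_getElem_cons hu
    rw [h1, List.take_succ_cons, List.take_zero]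
    simp [List.getD_eq_getElem?_getD, List.getElem?_eq_getElem hu]
  rw [this]
  rfl

lemma pv_W_one (l : List Char) (h : 1 ≤ l.length) : pvW l 1 = (l.length : Int) := by
  unfold pvW
  rw [Finset.sum_congr rfl (fun u hu => by
    rw [pv_dis_one l u (by simp at hu; omega)])]
  simp
  omega

lemma pv_A_eq_sumW (s : String) :
    appealSum0 s = ∑ i ∈ Finset.Ico 1 (s.toList.length + 1), pvW s.toList i := by
  set l := s.toList with hl
  set n := l.length with hn
  show (PySem.List.pyRange 2 ((n:Int) + 1)).foldl _ (n:Int) = _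
  have hbody : ∀ (ans : Int), ∀ i ∈ PySem.List.pyRange 2 ((n:Int) + 1),
      (let c := PySem.Dict.counter (PySem.List.slice l none (some i))
       let ans := ans + (c.size : Int)
       ((PySem.List.pyRange i (n:Int)).foldl (pvABody l i) (c, ans)).2)
      = ans + pvW l i.toNat := by
    intro ans i hi
    rw [PySem.List.mem_pyRange_one] at hi
    obtain ⟨iN, rfl⟩ : ∃ iN : Nat, i = ((iN : Nat) : Int) := ⟨i.toNat, by omega⟩
    have hi2 : 2 ≤ iN := by exact_mod_cast hi.1
    have hin : iN ≤ n := by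
      have := hi.2; omega
    have h1 : PySem.List.slice l none (some ((iN : Nat) : Int)) = l.take iN := by
      rw [PySem.List.slice_to l (by omega)]
      simp
    simp only [h1, Int.toNat_natCast]
    have hinv0 : pvInv ((l.drop 0).take iN) (PySem.Dict.counter (l.take iN)) := by
      simpa using pv_inv_counter (l.take iN)
    have hrange : PySem.List.pyRange ((iN : Nat) : Int) (n:Int)
        = PySem.List.pyRange (((0 + iN : Nat)) : Int) ((n : Nat) : Int) := by
      norm_num
    have hloop := pv_inner_loop l iN (by omega) (n - (0 + iN)) 0
      (PySem.Dict.counter (l.take iN))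
      (ans + ((PySem.Dict.counter (l.take iN)).size : Int)) rfl (by omega) hinv0
    rw [hrange, hloop]
    have hsize : (PySem.Dict.counter (l.take iN)).size = pvDis (l.take iN) :=
      pv_size_of_inv _ _ (pv_inv_counter _)
    rw [hsize]
    unfold pvW
    rw [Finset.range_eq_Ico,
      Finset.sum_eq_sum_Ico_succ_bot (a := 0) (b := n - iN + 1) (by omega)
        (fun u => (pvDis ((l.drop u).take iN) : Int))]
    simp only [List.drop_zero, zero_add]
    ring
  rw [PySem.List.foldl_congr_mem _ _ (fun ans i => ans + pvW l i.toNat) _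
    (fun acc x hx => hbody acc x hx)]
  rw [PySem.List.foldl_add]
  rw [show ((2:Int)) = ((2:Nat):Int) from rfl, show (n:Int) + 1 = (((n+1:Nat)):Int) by push_cast; ring]
  rw [pv_pyRange_natCast 2 (n+1)]
  rw [List.map_map]
  have hmap : ∀ k, ((fun i : Int => pvW l i.toNat) ∘ (fun k : Nat => ((2 + k : Nat) : Int))) k
      = pvW l (2 + k) := by
    intro k
    simp only [Function.comp]
    exact congrArg (pvW l) (by omega)
  rw [List.map_congr_left (fun k _ => hmap k)]
  have hlist : ((List.range (n + 1 - 2)).map (fun k => pvW l (2 + k))).sum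
      = ∑ k ∈ Finset.range (n + 1 - 2), pvW l (2 + k) := rfl
  rw [hlist]
  by_cases hn0 : n = 0
  · simp [hn0]
  · have h1n : 1 < n + 1 := by omega
    rw [Finset.sum_eq_sum_Ico_succ_bot (a := 1) (b := n + 1) h1n (fun i => pvW l i)]
    rw [pv_W_one l (by omega)]
    rw [Finset.sum_Ico_eq_sum_range]

-- G a b = contribution of window [a, b), written over the full j-range
def pvG (l : List Char) (a b : Nat) : Int :=
  ∑ j ∈ Finset.range (l.length + 1), if j ∈ Finset.Ico a b then pvE l a j else 0

lemma pv_dis_eq_G (l : List Char) (a i : Nat) (h : a + i ≤ l.length) :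
    (pvDis ((l.drop a).take i) : Int) = pvG l a (a + i) := by
  rw [pv_dis_window l a i h, pvG, Finset.sum_ite_mem]
  congr 1
  exact (Finset.inter_eq_right.2 (fun j hj => by
    rw [Finset.mem_Ico] at hj; rw [Finset.mem_range]; omega)).symm

lemma pv_count_gt (m j : Nat) (c : Int) :
    ∑ b ∈ Finset.range m, (if j < b then c else 0) = ((m - (j + 1) : Nat) : Int) * c := by
  induction m with
  | zero => simp
  | succ m ih =>
    rw [Finset.sum_range_succ, ih]
    by_cases h : j < m
    · rw [if_pos h]
      have : m + 1 - (j + 1) = (m - (j + 1)) + 1 := by omega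
      rw [this]; push_cast; ring
    · rw [if_neg h]
      have : m + 1 - (j + 1) = m - (j + 1) := by omega
      rw [this]; ring

lemma pv_range_sub (m k : Nat) (h : m ≤ k) : Finset.range m ⊆ Finset.range k := by
  intro x hx; rw [Finset.mem_range] at *; omega

lemma pv_sumW_eq_T (l : List Char) :
    (∑ i ∈ Finset.Ico 1 (l.length + 1), pvW l i) = pvT l := by
  -- 1: replace pvW by the ite-extended double sum over pvG
  have h1 : ∀ i ∈ Finset.Ico 1 (l.length + 1),
      pvW l i = ∑ u ∈ Finset.range (l.length + 1),
        (if u + i ≤ l.length then pvG l u (u + i) else 0) := by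
    intro i hi
    rw [Finset.mem_Ico] at hi
    calc pvW l i
        = ∑ u ∈ Finset.range (l.length - i + 1),
            (if u + i ≤ l.length then pvG l u (u + i) else 0) :=
          Finset.sum_congr rfl (fun u hu => by
            rw [Finset.mem_range] at hu
            exact (pv_dis_eq_G l u i (by omega)).trans (if_pos (by omega)).symm)
      _ = ∑ u ∈ Finset.range (l.length + 1),
            (if u + i ≤ l.length then pvG l u (u + i) else 0) :=
          Finset.sum_subset
            (pv_range_sub (l.length - i + 1) (l.length + 1) (by omega))
            (fun u hu hu2 => by
              rw [Finset.mem_range] at hu; rw [Finset.mem_range] at hu2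
              rw [if_neg (by omega)])
  rw [Finset.sum_congr rfl h1, Finset.sum_comm]
  -- 2: per start a, re-index window lengths i as right ends b = a + i
  have h2 : ∀ a ∈ Finset.range (l.length + 1),
      (∑ i ∈ Finset.Ico 1 (l.length + 1), if a + i ≤ l.length then pvG l a (a + i) else 0)
        = ∑ b ∈ Finset.Ico (a + 1) (l.length + 1), pvG l a b := by
    intro a ha
    rw [Finset.mem_range] at ha
    rw [Finset.sum_Ico_eq_sum_range, Finset.sum_Ico_eq_sum_range]
    rw [show l.length + 1 - 1 = l.length from by omega,
      show l.length + 1 - (a + 1) = l.length - a from by omega]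
    calc ∑ k ∈ Finset.range l.length, (if a + (1 + k) ≤ l.length then pvG l a (a + (1 + k)) else 0)
        = ∑ k ∈ Finset.range (l.length - a),
            (if a + (1 + k) ≤ l.length then pvG l a (a + (1 + k)) else 0) :=
          (Finset.sum_subset (pv_range_sub (l.length - a) l.length (by omega))
            (fun k hk hk2 => by
              rw [Finset.mem_range] at hk; rw [Finset.mem_range] at hk2
              rw [if_neg (by omega)])).symm
      _ = ∑ k ∈ Finset.range (l.length - a), pvG l a (a + 1 + k) :=
          Finset.sum_congr rfl (fun k hk => by
            rw [Finset.mem_range] at hk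
            exact (if_pos (by omega)).trans
              (by rw [show a + (1 + k) = a + 1 + k from by omega]))
  rw [Finset.sum_congr rfl h2]
  -- 3: expand pvG, swap right end b and position j, count the b's
  have h3 : ∀ a ∈ Finset.range (l.length + 1),
      (∑ b ∈ Finset.Ico (a + 1) (l.length + 1), pvG l a b)
        = ∑ j ∈ Finset.range (l.length + 1),
            (if a ≤ j then ((l.length - j : Nat) : Int) * pvE l a j else 0) := by
    intro a ha
    rw [Finset.mem_range] at ha
    simp only [pvG]
    rw [Finset.sum_comm]
    apply Finset.sum_congr rfl
    intro j hj
    rw [Finset.mem_range] at hj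
    by_cases haj : a ≤ j
    · rw [if_pos haj]
      calc ∑ b ∈ Finset.Ico (a + 1) (l.length + 1),
              (if j ∈ Finset.Ico a b then pvE l a j else 0)
          = ∑ b ∈ Finset.Ico (a + 1) (l.length + 1), (if j < b then pvE l a j else 0) :=
            Finset.sum_congr rfl (fun b hb => by
              simp only [Finset.mem_Ico, haj, true_and])
        _ = ∑ b ∈ Finset.range (l.length + 1), (if j < b then pvE l a j else 0) :=
            Finset.sum_subset
              (show Finset.Ico (a+1) (l.length+1) ⊆ Finset.range (l.length+1) from
                fun b hb => by
                  rw [Finset.mem_Ico] at hb; rw [Finset.mem_range]; omega)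
              (fun b hb hb2 => by
                rw [Finset.mem_range] at hb; rw [Finset.mem_Ico] at hb2
                rw [if_neg (by omega)])
        _ = ((l.length + 1 - (j + 1) : Nat) : Int) * pvE l a j :=
            pv_count_gt (l.length + 1) j (pvE l a j)
        _ = ((l.length - j : Nat) : Int) * pvE l a j := by
            rw [show l.length + 1 - (j + 1) = l.length - j from by omega]
    · rw [if_neg haj]
      apply Finset.sum_eq_zero
      intro b _
      rw [if_neg (fun hc => haj (Finset.mem_Ico.1 hc).1)]
  rw [Finset.sum_congr rfl h3, Finset.sum_comm]
  -- 4: per position j, the starts a collapse to pvCnt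
  have h4 : ∀ j ∈ Finset.range (l.length + 1),
      (∑ a ∈ Finset.range (l.length + 1),
          if a ≤ j then ((l.length - j : Nat) : Int) * pvE l a j else 0)
        = (pvCnt l j : Int) * ((l.length - j : Nat) : Int) := by
    intro j hj
    rw [Finset.mem_range] at hj
    calc ∑ a ∈ Finset.range (l.length + 1),
            (if a ≤ j then ((l.length - j : Nat) : Int) * pvE l a j else 0)
        = ∑ a ∈ Finset.range (j + 1),
            (if a ≤ j then ((l.length - j : Nat) : Int) * pvE l a j else 0) :=
          (Finset.sum_subset (pv_range_sub (j + 1) (l.length + 1) (by omega))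
            (fun a ha ha2 => by
              rw [Finset.mem_range] at ha; rw [Finset.mem_range] at ha2
              rw [if_neg (by omega)])).symm
      _ = ∑ a ∈ Finset.range (j + 1), ((l.length - j : Nat) : Int) * pvE l a j :=
          Finset.sum_congr rfl (fun a ha =>
            if_pos (show a ≤ j from by rw [Finset.mem_range] at ha; omega))
      _ = ((l.length - j : Nat) : Int) * ∑ a ∈ Finset.range (j + 1), pvE l a j := by
          rw [← Finset.mul_sum]
      _ = (pvCnt l j : Int) * ((l.length - j : Nat) : Int) := by
          have hcnt : (∑ a ∈ Finset.range (j + 1), pvE l a j) = (pvCnt l j : Int) := by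
            simp only [pvE, pvCnt]
            rw [Finset.sum_boole]
          rw [hcnt]; ring
  rw [Finset.sum_congr rfl h4]
  -- 5: drop the empty j = l.length term and line up with pvT
  rw [Finset.sum_range_succ, show ((l.length - l.length : Nat) : Int) = 0 from by omega,
    mul_zero, add_zero, pvT]
  apply Finset.sum_congr rfl
  intro j hj
  rw [Finset.mem_range] at hj
  rw [show ((l.length - j : Nat) : Int) = (l.length : Int) - ((j : Nat) : Int) from by omega]

lemma pv_cnt_eq (l : List Char) (j : Nat) (v : Int) (hj : j < l.length)
    (h : pvLast (l.take j) (l.getD j ' ') v) : (pvCnt l j : Int) = (j : Int) - v := by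
  have hplen : (l.take j).length = j := by
    rw [List.length_take]; omega
  rcases h with ⟨hv, hnm⟩ | ⟨hv0, hvlt, hvget, hvmax⟩
  · -- no previous occurrence: every start counts
    have hall : ∀ a ∈ Finset.range (j + 1), pvNew l a j = true := by
      intro a _
      simp only [pvNew, decide_eq_true_eq]
      intro hmem
      exact hnm (List.drop_subset _ _ hmem)
    rw [pvCnt, Finset.filter_true_of_mem hall, Finset.card_range, hv]
    push_cast; ring
  · -- previous occurrence at v: starts after it count
    have hiff : ∀ a ∈ Finset.range (j + 1), (pvNew l a j = true ↔ v < (a : Int)) := by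
      intro a ha
      rw [Finset.mem_range] at ha
      simp only [pvNew, decide_eq_true_eq]
      constructor
      · intro hnot
        by_contra hle
        push_neg at hle
        exact hnot ((pv_mem_drop_iff _ a _).2 ⟨v.toNat, by omega, by omega, hvget⟩)
      · intro hlt hmem
        rcases (pv_mem_drop_iff _ a _).1 hmem with ⟨m, ham, hmlt, hmget⟩
        exact hvmax m (by omega) hmlt hmget
    rw [pvCnt, Finset.filter_congr (fun a ha => by
      rw [hiff a ha, show (v < (a:Int)) ↔ (v.toNat < a) from by omega])]
    have hset : (Finset.range (j + 1)).filter (fun a => v.toNat < a)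
        = Finset.Ico (v.toNat + 1) (j + 1) := by
      ext a
      simp only [Finset.mem_filter, Finset.mem_range, Finset.mem_Ico]
      omega
    rw [hset, Nat.card_Ico]
    omega

lemma pv_last_empty (ch : Char) :
    pvLast [] ch ((PySem.Dict.empty (κ := Char) (ν := Int)).getD ch (-1)) := by
  left
  constructor
  · simp [PySem.Dict.getD, PySem.Dict.get?, PySem.Dict.empty]
  · exact List.not_mem_nil

lemma pv_last_step (p : List Char) (c : Char) (d : PySem.Dict Char Int)
    (h : ∀ ch, pvLast p ch (d.getD ch (-1))) :
    ∀ ch, pvLast (p ++ [c]) ch ((d.insert c (p.length : Int)).getD ch (-1)) := by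
  intro ch
  rw [PySem.Dict.getD_insert]
  by_cases hc : ch = c
  · rw [if_pos hc]
    right
    refine ⟨by omega, by simp, ?_, ?_⟩
    · rw [Int.toNat_natCast]
      rw [List.getD_eq_getElem?_getD, List.getElem?_append_right (le_refl _)]
      simp [hc]
    · intro m hm1 hm2
      simp only [List.length_append, List.length_cons, List.length_nil] at hm2
      omega
  · rw [if_neg hc]
    rcases h ch with ⟨hv, hnm⟩ | ⟨hv0, hvlt, hvget, hvmax⟩
    · left
      refine ⟨hv, ?_⟩
      intro hmem
      rcases List.mem_append.1 hmem with h' | h'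
      · exact hnm h'
      · exact hc (by simpa using h')
    · right
      refine ⟨hv0, ?_, ?_, ?_⟩
      · simp only [List.length_append, List.length_cons, List.length_nil]
        omega
      · rw [List.getD_eq_getElem?_getD, List.getElem?_append_left (by omega),
          ← List.getD_eq_getElem?_getD]
        exact hvget
      · intro m hm1 hm2
        simp only [List.length_append, List.length_cons, List.length_nil] at hm2
        by_cases hmp : m < p.length
        · rw [List.getD_eq_getElem?_getD, List.getElem?_append_left hmp,
            ← List.getD_eq_getElem?_getD]
          exact hvmax m hm1 hmp
        · have hmeq : m = p.length := by omega
          rw [hmeq, List.getD_eq_getElem?_getD, List.getElem?_append_right (le_refl _)]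
          simpa using fun he => hc he.symm

lemma pv_B_loop (l : List Char) :
    ∀ (suf : List Char) (t : Nat) (d : PySem.Dict Char Int) (ans : Int),
      l.drop t = suf → (∀ ch, pvLast (l.take t) ch (d.getD ch (-1))) →
      ((PySem.List.enumerate suf ((t : Nat) : Int)).foldl (pvBBody (l.length : Int)) (ans, d)).1
        = ans + ∑ j ∈ Finset.Ico t l.length, (pvCnt l j : Int) * ((l.length : Int) - (j : Nat)) := by
  intro suf
  induction suf with
  | nil =>
    intro t d ans hdrop hlast
    have ht : l.length ≤ t := by
      have := congrArg List.length hdrop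
      simp only [List.length_drop, List.length_nil] at this
      omega
    rw [show Finset.Ico t l.length = ∅ from Finset.Ico_eq_empty (by omega)]
    simp [PySem.List.enumerate]
  | cons x suf' ih =>
    intro t d ans hdrop hlast
    have ht : t < l.length := by
      have := congrArg List.length hdrop
      simp only [List.length_drop, List.length_cons] at this
      omega
    have hx : l.getD t ' ' = x := by
      have h0 : (l.drop t).getD 0 ' ' = x := by rw [hdrop]; rfl
      rw [← h0, List.getD_eq_getElem?_getD, List.getD_eq_getElem?_getD,
        List.getElem?_drop]
      norm_num
    have hdrop' : l.drop (t + 1) = suf' := by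
      have : l.drop (t + 1) = (l.drop t).drop 1 := by
        rw [List.drop_drop]
      rw [this, hdrop]
      rfl
    have htake : l.take (t + 1) = l.take t ++ [x] := by
      rw [List.take_add_one]
      congr 1
      rw [List.getElem?_eq_getElem ht]
      simp only [Option.toList_some]
      rw [← hx, List.getD_eq_getElem?_getD, List.getElem?_eq_getElem ht]
      rfl
    have hlen : ((l.take t).length : Int) = (t : Int) := by
      push_cast [List.length_take]
      omega
    have hlast' : ∀ ch, pvLast (l.take (t + 1)) ch ((d.insert x ((t : Nat) : Int)).getD ch (-1)) := by
      intro ch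
      rw [htake]
      have := pv_last_step (l.take t) x d hlast ch
      rw [hlen] at this
      exact this
    simp only [PySem.List.enumerate, List.foldl_cons]
    have hbody : pvBBody (l.length : Int) (ans, d) (((t : Nat) : Int), x)
        = (ans + (pvCnt l t : Int) * ((l.length : Int) - (t : Nat)), d.insert x ((t : Nat) : Int)) := by
      simp only [pvBBody]
      rw [← pv_cnt_eq l t (d.getD x (-1)) ht (by rw [hx]; exact hlast x)]
    rw [hbody]
    rw [show ((t : Nat) : Int) + 1 = (((t + 1 : Nat)) : Int) from by push_cast; ring]
    rw [ih (t + 1) (d.insert x ((t : Nat) : Int)) _ hdrop' hlast']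
    rw [show (∑ j ∈ Finset.Ico t l.length, (pvCnt l j : Int) * ((l.length : Int) - (j : Nat)))
        = (pvCnt l t : Int) * ((l.length : Int) - (t : Nat))
          + ∑ j ∈ Finset.Ico (t + 1) l.length, (pvCnt l j : Int) * ((l.length : Int) - (j : Nat))
      from Finset.sum_eq_sum_Ico_succ_bot (by omega) _]
    ring

lemma pv_B_eq_T (s : String) : appealSum0_alt s = pvT s.toList := by
  show ((PySem.List.enumerate s.toList 0).foldl (pvBBody (s.toList.length : Int))
    (0, PySem.Dict.empty)).1 = pvT s.toList
  rw [show PySem.List.enumerate s.toList 0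
      = PySem.List.enumerate s.toList ((0 : Nat) : Int) from by norm_num]
  rw [pv_B_loop s.toList s.toList 0 PySem.Dict.empty 0 (by rfl)
    (fun ch => by simpa using pv_last_empty ch)]
  rw [pvT, Finset.range_eq_Ico]
  ring

-- ===== VERDICT (by name: the statement is the Claim_ definition above) =====
theorem appealSum0_spec : Claim_equal_appealSum0 := by
  intro s _
  unfold Spec_appealSum0
  rw [pv_B_eq_T, ← pv_sumW_eq_T, ← pv_A_eq_sumW]
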